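-- pv_equiv track=rewrite | github.com/edwardtavila-boop/eta-engine | scripts/_change_summary.py | _by_dir
-- ===== SOURCE A (Python) =====
-- def _by_dir(numstat: list[tuple[int, int, str]]) -> dict[str, dict[str, int]]:
--     out: dict[str, dict[str, int]] = {}
--     for ins, dels, path in numstat:
--         top = path.split("/", 1)[0] if "/" in path else "(root)"
--         d = out.setdefault(top, {"ins": 0, "dels": 0, "files": 0})
--         d["ins"] += ins
--         d["dels"] += dels
--         d["files"] += 1
--     return out
-- ===== SOURCE B (Python) =====
-- def _by_dir(numstat: list[tuple[int, int, str]]) -> dict[str, dict[str, int]]: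
--     def top(p: str) -> str:
--         return p.split("/", 1)[0] if "/" in p else "(root)"
--     keys = list(dict.fromkeys(top(p) for _, _, p in numstat))
--     return {
--         k: {"ins": sum(i for i, _, p in numstat if top(p) == k),
--             "dels": sum(d for _, d, p in numstat if top(p) == k),
--             "files": sum(1 for _, _, p in numstat if top(p) == k)}
--         for k in keys
--     }
-- ===== Notes on version B (the rewrite author's own statement) =====
-- stated objective: alternative
-- what changed: Replaces A's single pass that grows and mutates a dict of counter-dicts with a group-then-reduce shape: first compute the distinct top-level keys in first-occurrence order, then build each aggregate row by one comprehension per field over the rows matching that key.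
import Mathlib
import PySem

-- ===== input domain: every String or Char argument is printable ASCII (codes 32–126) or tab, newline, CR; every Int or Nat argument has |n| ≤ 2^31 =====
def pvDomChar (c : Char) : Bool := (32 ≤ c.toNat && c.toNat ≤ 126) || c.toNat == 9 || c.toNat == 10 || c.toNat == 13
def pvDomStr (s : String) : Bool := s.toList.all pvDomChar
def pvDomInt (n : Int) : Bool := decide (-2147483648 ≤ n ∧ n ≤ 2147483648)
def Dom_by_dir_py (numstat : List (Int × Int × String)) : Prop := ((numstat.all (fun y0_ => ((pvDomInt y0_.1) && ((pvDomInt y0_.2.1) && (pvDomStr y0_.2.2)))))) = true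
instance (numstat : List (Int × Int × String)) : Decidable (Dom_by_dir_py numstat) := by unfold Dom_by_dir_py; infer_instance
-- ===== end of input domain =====

-- B replaces A's one-pass growing dict of mutated counter-dicts by a group-then-reduce shape
-- (distinct keys first, then one reduction per key); alternative decomposition, not faster.

-- ===== PORT A =====
-- literal port of A's loop: out is a dict of dicts; 'd = out.setdefault(top, {...}); d["ins"] += ins; …'
-- mutates the inner dict in place through out, modeled by Dict.modify at key top (the documented idiom).
-- path.split("/",1)[0]: split with a nonempty separator always returns 'some' of a nonempty list,
-- so the [0] indexing is total and ported as .getD [] followed by .headD "".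
def by_dir_py (numstat : List (Int × Int × String)) : List (String × List (String × Int)) :=
  let out : PySem.Dict String (PySem.Dict String Int) :=
    numstat.foldl (fun out r =>
      let ins := r.1
      let dels := r.2.1
      let path := r.2.2
      let top := if PySem.Str.isIn "/" path then
          (((PySem.Str.splitMax? path "/" 1).getD []).headD "") else "(root)"
      let out := out.setdefault top (PySem.Dict.ofList [("ins", 0), ("dels", 0), ("files", 0)])
      out.modify top (PySem.Dict.ofList [("ins", 0), ("dels", 0), ("files", 0)])
        (fun d => ((d.modify "ins" 0 (· + ins)).modify "dels" 0 (· + dels)).modify "files" 0 (· + 1)))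
      PySem.Dict.empty
  out.items.map (fun p => (p.1, p.2.items))

-- ===== PORT B =====
-- B-side helper: the 'top' function of Source B
def pvTop (p : String) : String :=
  if PySem.Str.isIn "/" p then (((PySem.Str.splitMax? p "/" 1).getD []).headD "") else "(root)"

def by_dir_py_alt (numstat : List (Int × Int × String)) : List (String × List (String × Int)) :=
  let keys := PySem.List.dedup (numstat.map (fun r => pvTop r.2.2))
  keys.map (fun k =>
    (k, [("ins", ((numstat.filter (fun r => pvTop r.2.2 == k)).map (fun r => r.1)).sum),
         ("dels", ((numstat.filter (fun r => pvTop r.2.2 == k)).map (fun r => r.2.1)).sum),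
         ("files", ((numstat.filter (fun r => pvTop r.2.2 == k)).length : Int))]))

-- ===== PRECONDITION & SPEC =====
def Spec_by_dir_py (numstat : List (Int × Int × String)) (out : List (String × List (String × Int))) : Prop := out = by_dir_py_alt numstat
instance (numstat : List (Int × Int × String)) (out : List (String × List (String × Int))) : Decidable (Spec_by_dir_py numstat out) := by unfold Spec_by_dir_py; infer_instance

-- ===== CLAIM (what is proved, stated in full; the proofs are below) =====
def Claim_equal_by_dir_py : Prop := ∀ (numstat : List (Int × Int × String)), Dom_by_dir_py numstat → Spec_by_dir_py numstat (by_dir_py numstat)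

-- ===== LEMMAS AND PROOFS =====

-- the step function of A's fold (named for the proofs; pvKey r is definitionally pvTop r.2.2)
def pvKey (r : Int × Int × String) : String := pvTop r.2.2

def pvStep (out : PySem.Dict String (PySem.Dict String Int)) (r : Int × Int × String) :
    PySem.Dict String (PySem.Dict String Int) :=
  (out.setdefault (pvKey r) (PySem.Dict.ofList [("ins", 0), ("dels", 0), ("files", 0)])).modify
    (pvKey r) (PySem.Dict.ofList [("ins", 0), ("dels", 0), ("files", 0)])
    (fun d => ((d.modify "ins" 0 (· + r.1)).modify "dels" 0 (· + r.2.1)).modify "files" 0 (· + 1))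

def pvInner (l : List (Int × Int × String)) (k : String) : PySem.Dict String Int :=
  ⟨[("ins", ((l.filter (fun r => pvKey r == k)).map (fun r => r.1)).sum),
    ("dels", ((l.filter (fun r => pvKey r == k)).map (fun r => r.2.1)).sum),
    ("files", ((l.filter (fun r => pvKey r == k)).length : Int))]⟩

lemma pv_dedup_append (xs : List String) (x : String) :
    PySem.List.dedup (xs ++ [x]) =
      if x ∈ xs then PySem.List.dedup xs else PySem.List.dedup xs ++ [x] := by
  simp only [PySem.List.dedup_eq_ofList, PySem.Set.ofList_eq_foldl, List.foldl_append, List.foldl]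
  rw [show (List.foldl PySem.Set.add [] xs).add x
        = if (List.foldl PySem.Set.add [] xs).contains x then List.foldl PySem.Set.add [] xs
          else List.foldl PySem.Set.add [] xs ++ [x] from rfl]
  by_cases h : x ∈ xs
  · rw [if_pos h, if_pos]
    rw [PySem.Set.contains_iff, ← PySem.Set.ofList_eq_foldl]
    exact (PySem.Set.mem_ofList xs x).2 h
  · rw [if_neg h, if_neg]
    intro hc
    exact h ((PySem.Set.mem_ofList xs x).1
      (by rw [PySem.Set.contains_iff, ← PySem.Set.ofList_eq_foldl] at hc; exact hc))

lemma pv_upd_lit (a b c ins dels : Int) :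
    ((((⟨[("ins", a), ("dels", b), ("files", c)]⟩ : PySem.Dict String Int).modify "ins" 0 (· + ins)).modify
        "dels" 0 (· + dels)).modify "files" 0 (· + 1)) =
      ⟨[("ins", a + ins), ("dels", b + dels), ("files", c + 1)]⟩ := by
  simp [PySem.Dict.modify, PySem.Dict.insert, PySem.Dict.getD, PySem.Dict.get?, PySem.Dict.contains]

lemma pv_contains_foldl (l : List (Int × Int × String)) (k : String)
    (hk : (l.foldl pvStep PySem.Dict.empty).keys = PySem.List.dedup (l.map pvKey)) :
    (l.foldl pvStep PySem.Dict.empty).contains k = decide (k ∈ l.map pvKey) := by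
  rw [PySem.Dict.contains_eq_decide_mem_keys, hk]
  simp

lemma pv_keys_foldl (l : List (Int × Int × String)) :
    (l.foldl pvStep PySem.Dict.empty).keys = PySem.List.dedup (l.map pvKey) := by
  induction l using List.reverseRecOn with
  | nil =>
    simp [PySem.Dict.keys_empty, PySem.List.dedup_eq_ofList, PySem.Set.ofList_eq_foldl]
  | append_singleton l r ih =>
    rw [List.foldl_append, List.foldl_cons, List.foldl_nil, List.map_append, List.map_cons,
      List.map_nil, pv_dedup_append, pvStep]
    have hc := pv_contains_foldl l (pvKey r) ih
    by_cases h : pvKey r ∈ l.map pvKey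
    · have hct : (l.foldl pvStep PySem.Dict.empty).contains (pvKey r) = true := by
        rw [hc]; exact decide_eq_true h
      rw [if_pos h, PySem.Dict.setdefault_of_contains _ _ hct, PySem.Dict.keys_modify,
        PySem.Dict.keys_insert_of_contains _ _ hct, ih]
    · have hcf : (l.foldl pvStep PySem.Dict.empty).contains (pvKey r) = false := by
        rw [hc]; exact decide_eq_false h
      rw [if_neg h, PySem.Dict.setdefault_of_not_contains _ _ hcf, PySem.Dict.keys_modify,
        PySem.Dict.keys_insert_of_contains _ _ (PySem.Dict.contains_insert_self _ _ _),
        PySem.Dict.keys_insert_of_not_contains _ _ hcf, ih]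

lemma pv_get?_foldl (l : List (Int × Int × String)) (k : String) :
    (l.foldl pvStep PySem.Dict.empty).get? k =
      if k ∈ l.map pvKey then some (pvInner l k) else none := by
  induction l using List.reverseRecOn generalizing k with
  | nil => simp [PySem.Dict.get?_empty]
  | append_singleton l r ih =>
    rw [List.foldl_append, List.foldl_cons, List.foldl_nil, pvStep]
    have hc := pv_contains_foldl l (pvKey r) (pv_keys_foldl l)
    have hmem : k ∈ (l ++ [r]).map pvKey ↔ (k ∈ l.map pvKey ∨ k = pvKey r) := by
      simp [List.map_append, eq_comm]
    by_cases h : pvKey r ∈ l.map pvKey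
    · have hct : (l.foldl pvStep PySem.Dict.empty).contains (pvKey r) = true := by
        rw [hc]; exact decide_eq_true h
      rw [PySem.Dict.setdefault_of_contains _ _ hct]
      rw [PySem.Dict.modify, PySem.Dict.get?_insert]
      have hgd : (l.foldl pvStep PySem.Dict.empty).getD (pvKey r)
          (PySem.Dict.ofList [("ins", 0), ("dels", 0), ("files", 0)]) = pvInner l (pvKey r) :=
        PySem.Dict.getD_of_get?_eq_some _ _ (by rw [ih, if_pos h])
      by_cases hk : k = pvKey r
      · rw [if_pos hk, hgd]
        rw [if_pos (hmem.2 (Or.inr hk))]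
        subst hk
        unfold pvInner
        rw [pv_upd_lit]
        simp [List.filter_append, List.filter_nil]
      · rw [if_neg hk, ih]
        by_cases hkl : k ∈ l.map pvKey
        · rw [if_pos hkl, if_pos (hmem.2 (Or.inl hkl))]
          have hf : ∀ x ∈ [r], ¬ (pvKey x == k) = true := by
            intro x hx
            simp only [List.mem_singleton] at hx; subst hx
            simp only [beq_iff_eq]; exact fun e => hk e.symm
          unfold pvInner
          rw [List.filter_append, List.filter_eq_nil_iff.2 hf]
          simp
        · rw [if_neg hkl, if_neg (fun hin => ((hmem.1 hin).elim hkl hk))]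
    · have hcf : (l.foldl pvStep PySem.Dict.empty).contains (pvKey r) = false := by
        rw [hc]; exact decide_eq_false h
      rw [PySem.Dict.setdefault_of_not_contains _ _ hcf]
      rw [PySem.Dict.modify, PySem.Dict.getD_of_get?_eq_some _ _ (PySem.Dict.get?_insert_self _ _ _),
        PySem.Dict.insert_insert_self, PySem.Dict.get?_insert]
      by_cases hk : k = pvKey r
      · rw [if_pos hk, if_pos (hmem.2 (Or.inr hk))]
        subst hk
        have hf : ∀ x ∈ l, ¬ (pvKey x == pvKey r) = true := by
          intro x hx hb
          exact h (by rw [← eq_of_beq hb]; exact List.mem_map_of_mem hx)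
        unfold pvInner
        rw [show (PySem.Dict.ofList [("ins", (0:Int)), ("dels", 0), ("files", 0)])
            = (⟨[("ins", 0), ("dels", 0), ("files", 0)]⟩ : PySem.Dict String Int) from rfl, pv_upd_lit]
        rw [List.filter_append, List.filter_eq_nil_iff.2 hf]
        simp
      · rw [if_neg hk, ih]
        by_cases hkl : k ∈ l.map pvKey
        · rw [if_pos hkl, if_pos (hmem.2 (Or.inl hkl))]
          have hf : ∀ x ∈ [r], ¬ (pvKey x == k) = true := by
            intro x hx
            simp only [List.mem_singleton] at hx; subst hx
            simp only [beq_iff_eq]; exact fun e => hk e.symm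
          unfold pvInner
          rw [List.filter_append, List.filter_eq_nil_iff.2 hf]
          simp
        · rw [if_neg hkl, if_neg (fun hin => ((hmem.1 hin).elim hkl hk))]

-- ===== VERDICT (by name: the statement is the Claim_ definition above) =====
theorem by_dir_py_spec : Claim_equal_by_dir_py := by
  intro numstat _
  unfold Spec_by_dir_py by_dir_py by_dir_py_alt
  show (List.foldl pvStep PySem.Dict.empty numstat).items.map (fun p => (p.1, p.2.items)) = _
  have hk := pv_keys_foldl numstat
  have hnd : (List.foldl pvStep PySem.Dict.empty numstat).keys.Nodup := by
    rw [hk]; exact PySem.List.nodup_dedup _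
  rw [PySem.Dict.items_eq_map_keys _ hnd (PySem.Dict.ofList [("ins", 0), ("dels", 0), ("files", 0)]),
    hk, List.map_map]
  apply List.map_congr_left
  intro k hkmem
  have hmem : k ∈ numstat.map pvKey := (PySem.List.mem_dedup _ _).1 hkmem
  have hgd : (List.foldl pvStep PySem.Dict.empty numstat).getD k
      (PySem.Dict.ofList [("ins", 0), ("dels", 0), ("files", 0)]) = pvInner numstat k :=
    PySem.Dict.getD_of_get?_eq_some _ _ (by rw [pv_get?_foldl numstat k, if_pos hmem])
  simp only [Function.comp_apply, hgd]
  rfl
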